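-- pv_equiv track=rewrite | github.com/Crask21/Mobile-Robotsystemer | Protocol/DataLink/protocol.py | hexa_to_msg
-- ===== SOURCE A (Python) =====
-- def hexa_to_msg(dtmf_signal):
--     temp_list = []
--     message = ""
--     for i in range(len(dtmf_signal)):
--         count = 0
--         if len(dtmf_signal[i])>2:
--             for j in range(len(dtmf_signal[i])-1):
--                 if count % 2 == 0:
--                     temp_list.append(hex(16*int(dtmf_signal[i][j],16)+int(dtmf_signal[i][j+1],16)))
--                     count = count+1
--                 else:
--                     count = count+1
--     for i in range(len(temp_list)):
--         message = message+chr(int(temp_list[i],16))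
--
--     return message
-- ===== SOURCE B (Python) =====
-- def hexa_to_msg(dtmf_signal):
--     parts = []
--     for s in dtmf_signal:
--         if len(s) > 2:
--             parts.append(bytes.fromhex(s[:len(s) // 2 * 2]).decode('latin-1'))
--     return "".join(parts)
-- ===== Notes on version B (the rewrite author's own statement) =====
-- stated objective: simpler
-- what changed: Replaces A's count-parity stride loop over indices, the intermediate temp_list of hex() strings and the hex->int->chr round-trip by one pass that truncates each long string to even length and decodes it pairwise with bytes.fromhex(...).decode('latin-1').
import Mathlib
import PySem

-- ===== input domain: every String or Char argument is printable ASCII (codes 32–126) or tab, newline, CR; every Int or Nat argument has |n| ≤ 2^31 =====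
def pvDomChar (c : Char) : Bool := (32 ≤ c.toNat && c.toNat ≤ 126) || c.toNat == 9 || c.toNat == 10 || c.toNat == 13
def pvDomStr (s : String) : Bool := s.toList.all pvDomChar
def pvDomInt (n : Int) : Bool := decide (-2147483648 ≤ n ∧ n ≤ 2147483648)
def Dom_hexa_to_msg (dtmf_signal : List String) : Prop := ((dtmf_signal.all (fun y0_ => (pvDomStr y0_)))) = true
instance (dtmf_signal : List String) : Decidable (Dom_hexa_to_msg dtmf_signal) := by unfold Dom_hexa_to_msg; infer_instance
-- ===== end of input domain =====

-- B replaces A's count-parity stride loop, temp_list of hex() strings and the hex->int round-trip by a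
-- per-string even-length truncation and a direct pairwise hex decode (bytes.fromhex); objective: simpler.

-- ===== PORT A =====
-- hex(n) builtin: '0x' + lowercase base-16 digits ('-0x…' for negatives; exact for every int)
def pvPyHex (n : Int) : String :=
  String.ofList (if n < 0 then '-' :: '0' :: 'x' :: Nat.toDigits 16 (-n).toNat
                 else '0' :: 'x' :: Nat.toDigits 16 n.toNat)

-- int(<one-char string>, 16); total form: Pre_ guarantees the parse succeeds wherever A evaluates it
def pvIntHex1 (c : Char) : Int := (PySem.Int.ofCharsBase? [c] 16).getD 0

-- the first loop of A: temp_list after processing all of dtmf_signal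
def pvTempList (dtmf_signal : List String) : List String :=
  (PySem.List.pyRange 0 (PySem.List.len dtmf_signal) 1).foldl (fun temp_list i =>
    if 2 < PySem.List.len (PySem.List.pyGetD dtmf_signal i "").toList then
      ((PySem.List.pyRange 0 (PySem.List.len (PySem.List.pyGetD dtmf_signal i "").toList - 1) 1).foldl
        (fun (st : List String × Int) j =>
          if PySem.Int.mod st.2 2 == 0 then
            (st.1 ++ [pvPyHex (16 * pvIntHex1 (PySem.List.pyGetD (PySem.List.pyGetD dtmf_signal i "").toList j ' ')
                                + pvIntHex1 (PySem.List.pyGetD (PySem.List.pyGetD dtmf_signal i "").toList (j + 1) ' '))],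
             st.2 + 1)
          else (st.1, st.2 + 1))
        (temp_list, 0)).1
    else temp_list) []

-- the second loop of A: message built from temp_list by chr(int(t, 16))
def hexa_to_msg (dtmf_signal : List String) : String :=
  String.ofList
    ((PySem.List.pyRange 0 (PySem.List.len (pvTempList dtmf_signal)) 1).foldl
      (fun message i =>
        message ++ [Char.ofNat ((PySem.Int.ofStrBase? (PySem.List.pyGetD (pvTempList dtmf_signal) i "") 16).getD 0).toNat])
      [])

-- ===== PORT B =====
-- hex value of one hex digit (the digit table of bytes.fromhex); Pre_ excludes non-hex chars, where fromhex raises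
def pvHexVal (c : Char) : Nat :=
  if 48 ≤ c.toNat ∧ c.toNat ≤ 57 then c.toNat - 48
  else if 97 ≤ c.toNat ∧ c.toNat ≤ 102 then c.toNat - 87
  else if 65 ≤ c.toNat ∧ c.toNat ≤ 70 then c.toNat - 55
  else 0

-- bytes.fromhex(·).decode('latin-1') on an even-length hex string: decode consecutive pairs
def pvDecodePairs : List Char → List Char
  | a :: b :: r => Char.ofNat (16 * pvHexVal a + pvHexVal b) :: pvDecodePairs r
  | _ => []

def hexa_to_msg_alt (dtmf_signal : List String) : String :=
  String.ofList
    ((dtmf_signal.filter (fun s => decide (2 < PySem.Str.len s))).flatMap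
      (fun s => pvDecodePairs (s.toList.take (s.toList.length / 2 * 2))))

-- ===== PRECONDITION & SPEC =====
def pvIsHex (c : Char) : Bool := ('0' ≤ c && c ≤ '9') || ('a' ≤ c && c ≤ 'f') || ('A' ≤ c && c ≤ 'F')

-- Pre_: in every string longer than 2 chars, every char of its even-length prefix is a hex digit —
-- exactly the inputs where all of A's int(c, 16) calls succeed (on any other input A raises ValueError).
def Pre_hexa_to_msg (dtmf_signal : List String) : Prop :=
  (dtmf_signal.all (fun s =>
    !(decide (2 < s.toList.length)) ||
    (s.toList.take (s.toList.length / 2 * 2)).all pvIsHex)) = true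
instance (dtmf_signal : List String) : Decidable (Pre_hexa_to_msg dtmf_signal) := by
  unfold Pre_hexa_to_msg; infer_instance

def pvWitness_hexa_to_msg : List String := ["48690a", "21", "4F7"]

def Spec_hexa_to_msg (dtmf_signal : List String) (out : String) : Prop := out = hexa_to_msg_alt dtmf_signal
instance (dtmf_signal : List String) (out : String) : Decidable (Spec_hexa_to_msg dtmf_signal out) := by unfold Spec_hexa_to_msg; infer_instance

-- ===== CLAIM (what is proved, stated in full; the proofs are below) =====
def Claim_equal_hexa_to_msg : Prop := ∀ (dtmf_signal : List String), Dom_hexa_to_msg dtmf_signal → Pre_hexa_to_msg dtmf_signal → Spec_hexa_to_msg dtmf_signal (hexa_to_msg dtmf_signal)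

-- ===== LEMMAS AND PROOFS =====

-- A's pairs, as A stores them: hex strings of consecutive even-index pairs
def pvPairsA : List Char → List String
  | a :: b :: r => pvPyHex (16 * pvIntHex1 a + pvIntHex1 b) :: pvPairsA r
  | _ => []

theorem pvPairsA_short (cs : List Char) (h : cs.length ≤ 1) : pvPairsA cs = [] := by
  match cs, h with
  | [], _ => rfl
  | [a], _ => rfl

-- step 1: digit agreement on the ASCII domain (decide over codes < 128, then transfer)
set_option maxRecDepth 4096 in
theorem pvIntHex1_eq (c : Char) (hdom : pvDomChar c = true) :
    pvIntHex1 c = (pvHexVal c : Int) := by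
  have hlt : c.toNat < 128 := by
    simp only [pvDomChar, Bool.or_eq_true, Bool.and_eq_true, decide_eq_true_eq, beq_iff_eq] at hdom
    omega
  have h128 : ∀ n : Nat, n < 128 → pvIntHex1 (Char.ofNat n) = (pvHexVal (Char.ofNat n) : Int) := by decide
  have := h128 c.toNat hlt
  rwa [Char.ofNat_toNat] at this

theorem pvHexVal_lt (c : Char) : pvHexVal c < 16 := by
  unfold pvHexVal
  split_ifs <;> omega

-- step 2: the hex() / int(·,16) round-trip on byte values
set_option maxRecDepth 8192 in
theorem pvRoundTrip (v : Nat) (hv : v < 256) :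
    (PySem.Int.ofStrBase? (pvPyHex (v : Int)) 16).getD 0 = (v : Int) := by
  have h : ∀ v : Nat, v < 256 → (PySem.Int.ofStrBase? (pvPyHex (v : Int)) 16).getD 0 = (v : Int) := by decide
  exact h v hv

-- step 3: A's inner count-stride loop appends exactly the even-index pair hex strings
theorem pvInner (k : Nat) : ∀ (cs : List Char) (a : Nat) (temp : List String),
    cs.length - a = k → a % 2 = 0 → a ≤ cs.length →
    ((PySem.List.pyRange (a : Int) ((cs.length : Int) - 1) 1).foldl
      (fun (st : List String × Int) j =>
        if PySem.Int.mod st.2 2 == 0 then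
          (st.1 ++ [pvPyHex (16 * pvIntHex1 (PySem.List.pyGetD cs j ' ')
                              + pvIntHex1 (PySem.List.pyGetD cs (j + 1) ' '))], st.2 + 1)
        else (st.1, st.2 + 1))
      (temp, (a : Int))).1 = temp ++ pvPairsA (cs.drop a) := by
  induction k using Nat.strong_induction_on with
  | _ k ih =>
    intro cs a temp hk ha hale
    by_cases hend : (cs.length : Int) - 1 ≤ a
    · rw [PySem.List.pyRange_one_eq_nil hend]
      simp [pvPairsA_short (cs.drop a) (by simp; omega)]
    · push_neg at hend
      have ha1 : a + 1 < cs.length := by have := hend; omega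
      have hacast : ((a : Int) + 1) = ((a + 1 : Nat) : Int) := by push_cast; ring
      rw [PySem.List.pyRange_one_cons hend, List.foldl_cons]
      have hmod0 : (PySem.Int.mod (a : Int) 2 == 0) = true := by
        rw [PySem.Int.mod_eq_emod_of_pos (by omega)]
        simp only [beq_iff_eq]
        omega
      rw [if_pos hmod0]
      have hdrop : cs.drop a = cs[a] :: cs[a + 1] :: cs.drop (a + 2) := by
        rw [List.drop_eq_getElem_cons (by omega)]
        congr 1
        rw [List.drop_eq_getElem_cons (by omega)]
      have hget1 : PySem.List.pyGetD cs (a : Int) ' ' = cs[a] := by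
        simp [List.getD_eq_getElem?_getD, List.getElem?_eq_getElem (show a < cs.length by omega)]
      have hget2 : PySem.List.pyGetD cs ((a : Int) + 1) ' ' = cs[a + 1] := by
        rw [hacast, PySem.List.pyGetD_natCast]
        simp [List.getD_eq_getElem?_getD, List.getElem?_eq_getElem ha1]
      rw [hget1, hget2]
      by_cases hend2 : (cs.length : Int) - 1 ≤ (a : Int) + 1
      · rw [PySem.List.pyRange_one_eq_nil hend2]
        simp only [List.foldl_nil]
        rw [hdrop]
        have hnil : cs.drop (a + 2) = [] := by rw [List.drop_eq_nil_iff]; omega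
        simp [pvPairsA, hnil]
      · push_neg at hend2
        rw [PySem.List.pyRange_one_cons hend2, List.foldl_cons]
        have hmod1 : ¬ ((PySem.Int.mod ((a : Int) + 1) 2 == 0) = true) := by
          rw [PySem.Int.mod_eq_emod_of_pos (by omega)]
          simp only [beq_iff_eq]
          omega
        rw [if_neg hmod1]
        have hc2 : ((a : Int) + 1 + 1) = ((a + 2 : Nat) : Int) := by push_cast; ring
        rw [hc2]
        rw [ih (k - 2) (by omega) cs (a + 2)
          (temp ++ [pvPyHex (16 * pvIntHex1 cs[a] + pvIntHex1 cs[a + 1])])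
          (by omega) (by omega) (by omega)]
        rw [hdrop]
        simp [pvPairsA]

-- step 4: per-string agreement of stored-then-reparsed pairs with B's direct decode
theorem pvPerString (cs : List Char) (hdom : ∀ c ∈ cs, pvDomChar c = true) :
    (pvPairsA cs).map
        (fun t => Char.ofNat ((PySem.Int.ofStrBase? t 16).getD 0).toNat)
      = pvDecodePairs (cs.take (cs.length / 2 * 2)) := by
  induction cs using pvPairsA.induct with
  | case1 a b r ihr =>
    have hda := hdom a (by simp)
    have hdb := hdom b (by simp)
    have hv : 16 * pvHexVal a + pvHexVal b < 256 := by
      have := pvHexVal_lt a; have := pvHexVal_lt b; omega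
    have htake : (a :: b :: r).take ((a :: b :: r).length / 2 * 2)
        = a :: b :: r.take (r.length / 2 * 2) := by
      have h2 : (a :: b :: r).length / 2 * 2 = r.length / 2 * 2 + 2 := by
        simp [List.length_cons]; omega
      rw [h2]
      rfl
    rw [htake]
    simp only [pvPairsA, pvDecodePairs, List.map_cons, List.cons_eq_cons]
    constructor
    · rw [pvIntHex1_eq a hda, pvIntHex1_eq b hdb]
      have hcast : 16 * (pvHexVal a : Int) + (pvHexVal b : Int)
          = ((16 * pvHexVal a + pvHexVal b : Nat) : Int) := by push_cast; ring
      rw [hcast, pvRoundTrip _ hv]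
      simp only [Int.toNat_natCast]
    · exact ihr (fun c hc => hdom c (by simp [hc]))
  | case2 cs h =>
    rcases cs with _ | ⟨a, _ | ⟨b, r⟩⟩
    · rfl
    · simp [pvPairsA, pvDecodePairs]
    · exact (h a b r rfl).elim

-- step 5a: A's first loop produces exactly the pair hex strings of the long strings
theorem pvTempList_eq (l : List String) :
    pvTempList l
      = (l.filter (fun s => decide ((2 : Int) < (s.toList.length : Int)))).flatMap
          (fun s => pvPairsA s.toList) := by
  unfold pvTempList
  simp only [PySem.List.len_eq]
  rw [PySem.List.foldl_pyRange_zero_pyGetD' l ""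
    (fun temp_list s =>
      if (2 : Int) < (s.toList.length : Int) then
        ((PySem.List.pyRange 0 ((s.toList.length : Int) - 1) 1).foldl
          (fun (st : List String × Int) j =>
            if PySem.Int.mod st.2 2 == 0 then
              (st.1 ++ [pvPyHex (16 * pvIntHex1 (PySem.List.pyGetD s.toList j ' ')
                                  + pvIntHex1 (PySem.List.pyGetD s.toList (j + 1) ' '))], st.2 + 1)
            else (st.1, st.2 + 1))
          (temp_list, 0)).1
      else temp_list) []]
  have hfun : (fun (temp_list : List String) (s : String) =>
      if (2 : Int) < (s.toList.length : Int) then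
        ((PySem.List.pyRange 0 ((s.toList.length : Int) - 1) 1).foldl
          (fun (st : List String × Int) j =>
            if PySem.Int.mod st.2 2 == 0 then
              (st.1 ++ [pvPyHex (16 * pvIntHex1 (PySem.List.pyGetD s.toList j ' ')
                                  + pvIntHex1 (PySem.List.pyGetD s.toList (j + 1) ' '))], st.2 + 1)
            else (st.1, st.2 + 1))
          (temp_list, 0)).1
      else temp_list)
      = (fun (temp_list : List String) (s : String) =>
          if (2 : Int) < (s.toList.length : Int) then temp_list ++ pvPairsA s.toList else temp_list) := by
    funext acc s
    split_ifs with h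
    · have hi := pvInner s.toList.length s.toList 0 acc (by omega) (by omega) (by omega)
      simp only [Nat.cast_zero, List.drop_zero] at hi
      exact hi
    · rfl
  rw [hfun]
  rw [PySem.List.foldl_ite_eq_foldl_filter]
  rw [PySem.List.foldl_append_eq_flatMap]
  simp only [List.nil_append]

-- step 5b: assemble the two loops
theorem pvMain (l : List String) (hdom : Dom_hexa_to_msg l) :
    hexa_to_msg l = hexa_to_msg_alt l := by
  unfold hexa_to_msg hexa_to_msg_alt
  simp only [PySem.Str.len_eq]
  rw [pvTempList_eq]
  simp only [PySem.List.len_eq]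
  rw [PySem.List.foldl_pyRange_zero_pyGetD'
    ((l.filter (fun s => decide ((2 : Int) < (s.toList.length : Int)))).flatMap
      (fun s => pvPairsA s.toList)) ""
    (fun message t =>
      message ++ [Char.ofNat ((PySem.Int.ofStrBase? t 16).getD 0).toNat]) []]
  rw [PySem.List.foldl_append_singleton_eq_map]
  simp only [List.nil_append]
  rw [List.map_flatMap]
  congr 1
  apply List.flatMap_congr
  intro s hs
  apply pvPerString
  intro c hc
  have hsl : s ∈ l := List.mem_of_mem_filter hs
  have hall := (List.all_eq_true.mp hdom) s hsl
  exact List.all_eq_true.mp hall c hc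

-- ===== VERDICT (by name: the statement is the Claim_ definition above) =====
theorem hexa_to_msg_spec : Claim_equal_hexa_to_msg := by
  intro l hdom _hpre
  unfold Spec_hexa_to_msg
  exact pvMain l hdom
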